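-- pv_equiv track=rewrite | github.com/Amuhaymin/Authorship-Attribution | authorship-attribution-markovchain.py | create_transition_counts
-- ===== SOURCE A (Python) =====
-- def create_transition_counts(tokens):
--     '''
--     Takes a list of tokens and returns a transition_counts dict of this form:
--     {
--         prev_token:
--         {
--             next_token: count,
--             next_token: count,
--             ...
--         },
--         prev_token:
--         {
--             ...
--         },
--         ...
--     }
--     '''
--     prev_token = tokens[0]
--     transition_counts = {}
--     for token in tokens[1:]:
--         if prev_token not in transition_counts:
--             transition_counts[prev_token] = {}
--         if token not in transition_counts[prev_token]:
--             transition_counts[prev_token][token] = 1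
--         else:
--             transition_counts[prev_token][token] += 1
--         prev_token = token
--     return transition_counts
-- ===== SOURCE B (Python) =====
-- def create_transition_counts(tokens):
--     # Flat pass: count each adjacent bigram once, then reshape the flat
--     # table into the nested {prev: {next: count}} dict in a second pass.
--     pairs = {}
--     for bigram in zip(tokens, tokens[1:]):
--         pairs[bigram] = pairs.get(bigram, 0) + 1
--     result = {}
--     for (prev, nxt), count in pairs.items():
--         result.setdefault(prev, {})[nxt] = count
--     return result
-- ===== Notes on version B (the rewrite author's own statement) =====
-- stated objective: idiomatic
-- what changed: Instead of threading prev_token through one loop that builds the nested dict with membership tests, B counts flat (prev, next) bigrams from zip(tokens, tokens[1:]) in one pass and then reshapes the flat counter into the nested dict in a second pass; on the empty list A raises IndexError while B naturally returns {} (excluded by Pre_, stated in Raises_).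
-- outside the precondition, e.g. on create_transition_counts([]): A raises IndexError, B returns {}
-- crash fix: On the empty token list A raises IndexError (tokens[0]); B returns the empty dict {}. — e.g. on create_transition_counts([]): A raises IndexError, B returns []
import Mathlib
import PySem

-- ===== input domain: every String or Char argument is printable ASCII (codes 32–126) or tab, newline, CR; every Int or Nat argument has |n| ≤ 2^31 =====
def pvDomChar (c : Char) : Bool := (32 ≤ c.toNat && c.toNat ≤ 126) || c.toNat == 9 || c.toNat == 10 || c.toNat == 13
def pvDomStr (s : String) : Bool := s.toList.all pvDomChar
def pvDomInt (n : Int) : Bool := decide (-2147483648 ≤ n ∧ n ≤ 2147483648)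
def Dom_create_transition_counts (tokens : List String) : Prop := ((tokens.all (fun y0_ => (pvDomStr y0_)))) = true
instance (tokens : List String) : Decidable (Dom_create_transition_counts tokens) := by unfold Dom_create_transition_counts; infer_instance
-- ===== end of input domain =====

-- B replaces A's prev-threading nested-dict loop by a flat bigram count over zip(tokens, tokens[1:])
-- plus a reshape pass (idiomatic decomposition, same cost); on [] A raises IndexError, B returns {} (see Raises_).


-- ===== PORT A =====
def create_transition_counts (tokens : List String) : List (String × List (String × Int)) :=
  match PySem.List.pyGet? tokens 0 with
  | none => []   -- tokens[0] raises IndexError in Python; excluded by Pre_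
  | some p0 =>
    let st := (PySem.List.slice tokens (some 1) none).foldl
      (fun (st : String × PySem.Dict String (PySem.Dict String Int)) token =>
        let prev := st.1
        let d := st.2
        let d1 := if d.contains prev then d else d.insert prev PySem.Dict.empty
        let inner := d1.getD prev PySem.Dict.empty
        let inner' := if inner.contains token then inner.insert token (inner.getD token 0 + 1)
                      else inner.insert token 1
        (token, d1.insert prev inner'))
      (p0, PySem.Dict.empty)
    st.2.items.map (fun kv => (kv.1, kv.2.items))

-- ===== PORT B =====
def create_transition_counts_alt (tokens : List String) : List (String × List (String × Int)) :=
  let pairs := (tokens.zip (PySem.List.slice tokens (some 1) none)).foldl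
      (fun (d : PySem.Dict (String × String) Int) bg => d.insert bg (d.getD bg 0 + 1))
      PySem.Dict.empty
  let result := pairs.items.foldl
      (fun (r : PySem.Dict String (PySem.Dict String Int)) e =>
        let r1 := r.setdefault e.1.1 PySem.Dict.empty
        r1.insert e.1.1 ((r1.getD e.1.1 PySem.Dict.empty).insert e.1.2 e.2))
      PySem.Dict.empty
  result.items.map (fun kv => (kv.1, kv.2.items))

-- ===== PRECONDITION & SPEC =====
-- Pre_ excludes only the empty list, on which Python A raises IndexError (tokens[0]).
def Pre_create_transition_counts (tokens : List String) : Prop := tokens ≠ []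
instance (tokens : List String) : Decidable (Pre_create_transition_counts tokens) := by unfold Pre_create_transition_counts; infer_instance
def pvWitness_create_transition_counts : List String := ["a", "b", "a", "b"]

-- On the empty token list A raises IndexError (tokens[0]); B returns the empty dict {}.
def Raises_create_transition_counts (tokens : List String) : Prop := tokens = []
instance (tokens : List String) : Decidable (Raises_create_transition_counts tokens) := by unfold Raises_create_transition_counts; infer_instance
def pvRaiseWitness_create_transition_counts : List String := []
def pvRaiseWitnessOut_create_transition_counts : List (String × List (String × Int)) := []

def Spec_create_transition_counts (tokens : List String) (out : List (String × List (String × Int))) : Prop := out = create_transition_counts_alt tokens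
instance (tokens : List String) (out : List (String × List (String × Int))) : Decidable (Spec_create_transition_counts tokens out) := by unfold Spec_create_transition_counts; infer_instance

-- ===== CLAIM (what is proved, stated in full; the proofs are below) =====
def Claim_equal_create_transition_counts : Prop := ∀ (tokens : List String), Dom_create_transition_counts tokens → Pre_create_transition_counts tokens → Spec_create_transition_counts tokens (create_transition_counts tokens)
def Claim_raises_create_transition_counts : Prop := (∀ (tokens : List String), Dom_create_transition_counts tokens → Raises_create_transition_counts tokens → ¬ Pre_create_transition_counts tokens) ∧ (Dom_create_transition_counts (pvRaiseWitness_create_transition_counts) ∧ Raises_create_transition_counts (pvRaiseWitness_create_transition_counts) ∧ create_transition_counts_alt (pvRaiseWitness_create_transition_counts) = pvRaiseWitnessOut_create_transition_counts)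

-- ===== LEMMAS AND PROOFS =====

-- setting the (p, t) slot of the nested dict
def pvSetSlot (r : PySem.Dict String (PySem.Dict String Int)) (p t : String) (v : Int) :
    PySem.Dict String (PySem.Dict String Int) :=
  r.insert p ((r.getD p PySem.Dict.empty).insert t v)

def pvBump (r : PySem.Dict String (PySem.Dict String Int)) (p t : String) :
    PySem.Dict String (PySem.Dict String Int) :=
  let inner := r.getD p PySem.Dict.empty
  pvSetSlot r p t (if inner.contains t then inner.getD t 0 + 1 else 1)

def pvBstep (r : PySem.Dict String (PySem.Dict String Int)) (e : (String × String) × Int) :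
    PySem.Dict String (PySem.Dict String Int) :=
  pvSetSlot r e.1.1 e.1.2 e.2

def pvSlotPresent (r : PySem.Dict String (PySem.Dict String Int)) (p t : String) : Prop :=
  ((r.getD p PySem.Dict.empty).get? t).isSome = true

theorem pv_insert_comm_of_contains {κ ν : Type} [BEq κ] [LawfulBEq κ]
    (d : PySem.Dict κ ν) (k k' : κ) (v w : ν)
    (h : d.contains k = true) (hne : k' ≠ k) :
    (d.insert k v).insert k' w = (d.insert k' w).insert k v := by
  apply PySem.Dict.ext
  by_cases hc' : d.contains k' = true
  · rw [PySem.Dict.items_insert_of_contains _ w (by rw [PySem.Dict.contains_insert]; simp [hc']),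
        PySem.Dict.items_insert_of_contains _ v h,
        PySem.Dict.items_insert_of_contains _ v (by rw [PySem.Dict.contains_insert]; simp [h]),
        PySem.Dict.items_insert_of_contains _ w hc']
    rw [List.map_map, List.map_map]
    apply List.map_congr_left
    intro q _
    simp only [Function.comp]
    by_cases h1 : q.1 = k
    · have : ¬ (k == k') = true := by simp [Ne.symm hne]
      simp [h1, this]
    · by_cases h2 : q.1 = k'
      · have : ¬ (k' == k) = true := by simp [hne]
        simp [h2, this]
      · simp [h1, h2]
  · have hc'f : d.contains k' = false := by simpa using hc'
    rw [PySem.Dict.items_insert_of_not_contains _ w (by rw [PySem.Dict.contains_insert]; simp [hc'f, hne]),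
        PySem.Dict.items_insert_of_contains _ v h,
        PySem.Dict.items_insert_of_contains _ v (by rw [PySem.Dict.contains_insert]; simp [h]),
        PySem.Dict.items_insert_of_not_contains _ w hc'f]
    rw [List.map_append]
    simp only [List.map_cons, List.map_nil, List.append_cancel_left_eq, List.cons.injEq, and_true]
    have : ¬ (k' == k) = true := by simp [hne]
    simp [this]

theorem pv_contains_of_slotPresent (r : PySem.Dict String (PySem.Dict String Int)) (p t : String)
    (h : pvSlotPresent r p t) : r.contains p = true := by
  by_contra hc
  have hf : r.contains p = false := by simpa using hc
  rw [pvSlotPresent, PySem.Dict.getD_of_not_contains _ _ hf] at h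
  simp [PySem.Dict.get?_empty] at h

theorem pv_swap (r : PySem.Dict String (PySem.Dict String Int)) (p t : String) (w : Int)
    (e : (String × String) × Int) (hp : pvSlotPresent r p t) (hne : e.1 ≠ (p, t)) :
    pvBstep (pvSetSlot r p t w) e = pvSetSlot (pvBstep r e) p t w := by
  obtain ⟨⟨p', t'⟩, v⟩ := e
  have hcp : r.contains p = true := pv_contains_of_slotPresent r p t hp
  by_cases hpp : p' = p
  · subst hpp
    have htt : t' ≠ t := by intro h; exact hne (by simp [h])
    have hct : (r.getD p' PySem.Dict.empty).contains t = true := by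
      rw [PySem.Dict.contains_eq_isSome_get?]; exact hp
    simp only [pvBstep, pvSetSlot]
    rw [PySem.Dict.getD_insert_self, PySem.Dict.insert_insert_self,
        PySem.Dict.getD_insert_self, PySem.Dict.insert_insert_self,
        pv_insert_comm_of_contains _ t t' w v hct htt]
  · simp only [pvBstep, pvSetSlot]
    rw [PySem.Dict.getD_insert_of_ne _ _ _ hpp, PySem.Dict.getD_insert_of_ne _ _ _ (Ne.symm hpp),
        pv_insert_comm_of_contains _ p p' _ _ hcp hpp]

theorem pv_slotPresent_step (r : PySem.Dict String (PySem.Dict String Int)) (p t : String)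
    (e : (String × String) × Int) (hp : pvSlotPresent r p t) (hne : e.1 ≠ (p, t)) :
    pvSlotPresent (pvBstep r e) p t := by
  obtain ⟨⟨p', t'⟩, v⟩ := e
  by_cases hpp : p = p'
  · subst hpp
    have htt : t ≠ t' := by intro h; exact hne (by simp [h])
    simp only [pvBstep, pvSetSlot, pvSlotPresent] at *
    rw [PySem.Dict.getD_insert_self, PySem.Dict.get?_insert_of_ne _ _ htt]
    exact hp
  · simp only [pvBstep, pvSetSlot, pvSlotPresent] at *
    rw [PySem.Dict.getD_insert_of_ne _ _ _ hpp]
    exact hp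

theorem pv_absent_step (r : PySem.Dict String (PySem.Dict String Int)) (p t : String)
    (e : (String × String) × Int) (hne : e.1 ≠ (p, t)) :
    ((pvBstep r e).getD p PySem.Dict.empty).get? t = ((r.getD p PySem.Dict.empty).get? t) := by
  obtain ⟨⟨p', t'⟩, v⟩ := e
  by_cases hpp : p = p'
  · subst hpp
    have htt : t ≠ t' := by intro h; exact hne (by simp [h])
    simp only [pvBstep, pvSetSlot]
    rw [PySem.Dict.getD_insert_self, PySem.Dict.get?_insert_of_ne _ _ htt]
  · simp only [pvBstep, pvSetSlot]
    rw [PySem.Dict.getD_insert_of_ne _ _ _ hpp]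

theorem pv_comm (its : List ((String × String) × Int))
    (r : PySem.Dict String (PySem.Dict String Int)) (p t : String) (w : Int)
    (hp : pvSlotPresent r p t) (hk : ∀ e ∈ its, e.1 ≠ (p, t)) :
    its.foldl pvBstep (pvSetSlot r p t w) = pvSetSlot (its.foldl pvBstep r) p t w := by
  induction its generalizing r with
  | nil => rfl
  | cons e rest ih =>
    simp only [List.foldl_cons]
    rw [pv_swap r p t w e hp (hk e (by simp))]
    exact ih (pvBstep r e) (pv_slotPresent_step r p t e hp (hk e (by simp)))
      (fun e' he' => hk e' (by simp [he']))

theorem pv_absent (its : List ((String × String) × Int))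
    (r : PySem.Dict String (PySem.Dict String Int)) (p t : String)
    (hk : ∀ e ∈ its, e.1 ≠ (p, t)) :
    ((its.foldl pvBstep r).getD p PySem.Dict.empty).get? t
      = ((r.getD p PySem.Dict.empty).get? t) := by
  induction its generalizing r with
  | nil => rfl
  | cons e rest ih =>
    simp only [List.foldl_cons]
    rw [ih (pvBstep r e) (fun e' he' => hk e' (by simp [he'])),
        pv_absent_step r p t e (hk e (by simp))]

theorem pv_crux (c : PySem.Dict (String × String) Int) (p t : String)
    (hnd : c.keys.Nodup) :
    (c.insert (p, t) (c.getD (p, t) 0 + 1)).items.foldl pvBstep PySem.Dict.empty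
      = pvBump (c.items.foldl pvBstep PySem.Dict.empty) p t := by
  by_cases hc : c.contains (p, t) = true
  · -- bigram already counted: in-place value bump in the counter
    have hcs := hc
    rw [PySem.Dict.contains_eq_isSome_get?] at hcs
    obtain ⟨k, hk⟩ := Option.isSome_iff_exists.mp hcs
    have hmem : ((p, t), k) ∈ c.items := PySem.Dict.mem_items_of_get?_eq_some c hk
    obtain ⟨pre, post, hsplit⟩ := List.append_of_mem hmem
    have hgetD : c.getD (p, t) 0 = k := by
      rw [PySem.Dict.getD_eq_get?_getD, hk]; rfl
    have hkeys : c.keys = pre.map (·.1) ++ (p, t) :: post.map (·.1) := by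
      simp [PySem.Dict.keys, hsplit]
    rw [hkeys] at hnd
    rw [List.nodup_append] at hnd
    have hpre : ∀ e ∈ pre, e.1 ≠ (p, t) := by
      intro e he h
      have hm : (p, t) ∈ pre.map (·.1) := List.mem_map.mpr ⟨e, he, h⟩
      exact hnd.2.2 (p, t) hm (p, t) List.mem_cons_self rfl
    have hpost : ∀ e ∈ post, e.1 ≠ (p, t) := by
      intro e he h
      have hm : (p, t) ∈ post.map (·.1) := List.mem_map.mpr ⟨e, he, h⟩
      exact (List.nodup_cons.mp hnd.2.1).1 hm
    have hmap : ∀ (l : List ((String × String) × Int)), (∀ e ∈ l, e.1 ≠ (p, t)) →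
        (l.map (fun q => if (q.1 == (p, t)) = true then ((p, t), k + 1) else q)) = l := by
      intro l hl
      conv_rhs => rw [← List.map_id l]
      apply List.map_congr_left
      intro a ha
      simp [hl a ha]
    have hitems : (c.insert (p, t) (c.getD (p, t) 0 + 1)).items
        = pre ++ ((p, t), k + 1) :: post := by
      rw [PySem.Dict.items_insert_of_contains c _ hc, hsplit, hgetD,
          List.map_append, List.map_cons, hmap pre hpre, hmap post hpost]
      simp
    rw [hitems, hsplit, List.foldl_append, List.foldl_append, List.foldl_cons, List.foldl_cons]
    set r0 := pre.foldl pvBstep PySem.Dict.empty with hr0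
    have hstep1 : pvBstep r0 ((p, t), k + 1) = pvSetSlot r0 p t (k + 1) := rfl
    have hstep2 : pvBstep r0 ((p, t), k) = pvSetSlot r0 p t k := rfl
    rw [hstep1, hstep2]
    have hsp : pvSlotPresent (pvSetSlot r0 p t k) p t := by
      simp [pvSlotPresent, pvSetSlot, PySem.Dict.getD_insert_self, PySem.Dict.get?_insert_self]
    have hss : pvSetSlot r0 p t (k + 1) = pvSetSlot (pvSetSlot r0 p t k) p t (k + 1) := by
      simp only [pvSetSlot]
      rw [PySem.Dict.getD_insert_self, PySem.Dict.insert_insert_self, PySem.Dict.insert_insert_self]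
    rw [hss, pv_comm post _ p t (k + 1) hsp hpost]
    have hget : ((post.foldl pvBstep (pvSetSlot r0 p t k)).getD p PySem.Dict.empty).get? t
        = some k := by
      rw [pv_absent post _ p t hpost]
      simp [pvSetSlot, PySem.Dict.getD_insert_self, PySem.Dict.get?_insert_self]
    simp only [pvBump]
    rw [show ((post.foldl pvBstep (pvSetSlot r0 p t k)).getD p PySem.Dict.empty).contains t = true by
          rw [PySem.Dict.contains_eq_isSome_get?, hget]; rfl,
        if_pos rfl]
    rw [show ((post.foldl pvBstep (pvSetSlot r0 p t k)).getD p PySem.Dict.empty).getD t 0 = k by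
          rw [PySem.Dict.getD_eq_get?_getD, hget]; rfl]
  · -- fresh bigram: appended at the end of the counter
    have hcf : c.contains (p, t) = false := by simpa using hc
    have hk : ∀ e ∈ c.items, e.1 ≠ (p, t) := by
      intro e he h
      have hm : e.1 ∈ c.items.map (·.1) := List.mem_map.mpr ⟨e, he, rfl⟩
      have : c.contains (p, t) = true := by
        rw [PySem.Dict.contains_iff_mem_keys]
        simp only [PySem.Dict.keys]
        exact h ▸ hm
      simp [this] at hcf
    have hitems : (c.insert (p, t) (c.getD (p, t) 0 + 1)).items = c.items ++ [((p, t), 1)] := by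
      rw [PySem.Dict.getD_of_not_contains _ _ hcf, PySem.Dict.items_insert_of_not_contains _ _ hcf]
      norm_num
    rw [hitems, List.foldl_append, List.foldl_cons, List.foldl_nil]
    have hget : (((c.items.foldl pvBstep PySem.Dict.empty)).getD p PySem.Dict.empty).get? t
        = none := by
      rw [pv_absent c.items _ p t hk]
      simp [PySem.Dict.getD_empty, PySem.Dict.get?_empty]
    simp only [pvBump, pvBstep]
    rw [show ((c.items.foldl pvBstep PySem.Dict.empty).getD p PySem.Dict.empty).contains t = false by
          rw [PySem.Dict.contains_eq_isSome_get?, hget]; rfl]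
    simp

theorem pv_main (ps : List (String × String)) :
    ps.foldl (fun d pr => pvBump d pr.1 pr.2) PySem.Dict.empty
      = (PySem.Dict.counter ps).items.foldl pvBstep PySem.Dict.empty := by
  induction ps using List.reverseRecOn with
  | nil => rfl
  | append_singleton ps bg ih =>
    rw [List.foldl_append, List.foldl_cons, List.foldl_nil, ih,
        PySem.Dict.counter_append_singleton, PySem.Dict.modify]
    exact (pv_crux (PySem.Dict.counter ps) bg.1 bg.2 (PySem.Dict.nodup_keys_counter ps)).symm

theorem pv_astep (d : PySem.Dict String (PySem.Dict String Int)) (p tkn : String) :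
    (let d1 := if d.contains p then d else d.insert p PySem.Dict.empty
     let inner := d1.getD p PySem.Dict.empty
     let inner' := if inner.contains tkn then inner.insert tkn (inner.getD tkn 0 + 1)
                   else inner.insert tkn 1
     d1.insert p inner') = pvBump d p tkn := by
  by_cases hc : d.contains p = true
  · simp only [hc, if_pos, pvBump, pvSetSlot]
    split_ifs <;> rfl
  · have hcf : d.contains p = false := by simpa using hc
    simp only [hcf, Bool.false_eq_true, if_false, pvBump, pvSetSlot]
    rw [PySem.Dict.getD_insert_self, PySem.Dict.getD_of_not_contains _ _ hcf,
        PySem.Dict.insert_insert_self]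
    split_ifs <;> rfl

theorem pv_thread (rest : List String) (p : String)
    (d : PySem.Dict String (PySem.Dict String Int)) :
    (rest.foldl
      (fun (st : String × PySem.Dict String (PySem.Dict String Int)) token =>
        let prev := st.1
        let d := st.2
        let d1 := if d.contains prev then d else d.insert prev PySem.Dict.empty
        let inner := d1.getD prev PySem.Dict.empty
        let inner' := if inner.contains token then inner.insert token (inner.getD token 0 + 1)
                      else inner.insert token 1
        (token, d1.insert prev inner'))
      (p, d)).2
      = ((p :: rest).zip rest).foldl (fun d pr => pvBump d pr.1 pr.2) d := by
  induction rest generalizing p d with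
  | nil => rfl
  | cons t r' ih =>
    rw [List.foldl_cons, List.zip_cons_cons, List.foldl_cons]
    show (List.foldl _ (t, (let d1 := if d.contains p then d else d.insert p PySem.Dict.empty
      let inner := d1.getD p PySem.Dict.empty
      let inner' := if inner.contains t then inner.insert t (inner.getD t 0 + 1)
                    else inner.insert t 1
      d1.insert p inner')) r').2 = _
    rw [pv_astep]
    exact ih t (pvBump d p t)

theorem pv_bstep_eq :
    (fun (r : PySem.Dict String (PySem.Dict String Int)) (e : (String × String) × Int) =>
      let r1 := r.setdefault e.1.1 PySem.Dict.empty
      r1.insert e.1.1 ((r1.getD e.1.1 PySem.Dict.empty).insert e.1.2 e.2)) = pvBstep := by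
  funext r e
  simp only [pvBstep, pvSetSlot]
  by_cases hc : r.contains e.1.1 = true
  · rw [PySem.Dict.setdefault_of_contains _ _ hc]
  · have hcf : r.contains e.1.1 = false := by simpa using hc
    rw [PySem.Dict.setdefault_of_not_contains _ _ hcf, PySem.Dict.getD_insert_self,
        PySem.Dict.getD_of_not_contains _ _ hcf, PySem.Dict.insert_insert_self]

-- the two ports compute the same nested dict on a nonempty token list
theorem pv_equal (p0 : String) (rest : List String) :
    (fun tokens =>
      match PySem.List.pyGet? tokens 0 with
      | none => ([] : List (String × List (String × Int)))
      | some p0 =>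
        let st := (PySem.List.slice tokens (some 1) none).foldl
          (fun (st : String × PySem.Dict String (PySem.Dict String Int)) token =>
            let prev := st.1
            let d := st.2
            let d1 := if d.contains prev then d else d.insert prev PySem.Dict.empty
            let inner := d1.getD prev PySem.Dict.empty
            let inner' := if inner.contains token then inner.insert token (inner.getD token 0 + 1)
                          else inner.insert token 1
            (token, d1.insert prev inner'))
          (p0, PySem.Dict.empty)
        st.2.items.map (fun kv => (kv.1, kv.2.items))) (p0 :: rest)
    = (fun tokens =>
      let pairs := (tokens.zip (PySem.List.slice tokens (some 1) none)).foldl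
          (fun (d : PySem.Dict (String × String) Int) bg => d.insert bg (d.getD bg 0 + 1))
          PySem.Dict.empty
      let result := pairs.items.foldl
          (fun (r : PySem.Dict String (PySem.Dict String Int)) e =>
            let r1 := r.setdefault e.1.1 PySem.Dict.empty
            r1.insert e.1.1 ((r1.getD e.1.1 PySem.Dict.empty).insert e.1.2 e.2))
          PySem.Dict.empty
      result.items.map (fun kv => (kv.1, kv.2.items))) (p0 :: rest) := by
  have hget : PySem.List.pyGet? (p0 :: rest) 0 = some p0 := by
    simp [PySem.List.pyGet?, PySem.List.pyIdx?]
  simp only [hget, PySem.List.slice_from_one, List.tail_cons]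
  rw [pv_thread rest p0 PySem.Dict.empty, pv_bstep_eq,
      PySem.Dict.foldl_insert_getD_add_one_eq_counter, pv_main]

-- ===== VERDICT (by name: the statement is the Claim_ definition above) =====
theorem create_transition_counts_spec : Claim_equal_create_transition_counts := by
  intro tokens _ hpre
  unfold Spec_create_transition_counts
  cases tokens with
  | nil => exact absurd rfl hpre
  | cons p0 rest => exact pv_equal p0 rest

@[simp] theorem create_transition_counts_raises : Claim_raises_create_transition_counts := by
  unfold Claim_raises_create_transition_counts
  exact ⟨fun tokens _ hr hp => hp hr, by decide⟩
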